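-- pv_equiv track=rewrite | github.com/dfki-ric-quantum/tn_explainability | tn/ttn/traversal.py | _root_to_leaf
-- ===== SOURCE A (Python) =====
-- def _is_left_node(node: int) -> bool:
--     """Check if node is connecting to parent from the left."""
--     return node % 2 == 1
--
-- def _is_leaf(node: int, n_nodes: int) -> bool:
--     """Check if node is leaf node."""
--     return node >= _left_leaf(n_nodes) and node <= _right_leaf(n_nodes)
--
-- def _parent(node: int) -> int:
--     """Get parent of a node."""
--     if _is_left_node(node):
--         return (node - 1) // 2
--     else:
--         return (node - 2) // 2
--
-- def _left_leaf(n_nodes: int) -> int: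
--     """Get left-most leaf of the tree."""
--     return n_nodes // 2
--
-- def _right_leaf(n_nodes: int) -> int:
--     """Get right-most leaf of the tree."""
--     return n_nodes - 1
--
-- def _root_to_leaf(node: int, n_nodes: int) -> list[int]:
--     """Return the path from the root node to a specified leaf.
--
--     Parameters
--     ----------
--     node: int
--         The leaf node
--     n_nodes: int
--         number of nodes in the tree
--
--     Returns
--     -------
--     List of nodes to traverse from root to the leaf.
--     """
--
--     assert _is_leaf(node, n_nodes), f"Node {node} is not a leaf node"
--
--     path = [node]
--
--     while node != 0:
--         parent = _parent(node)
--         path.append(parent)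
--         node = parent
--
--     return list(reversed(path))
-- ===== SOURCE B (Python) =====
-- def _root_to_leaf(node: int, n_nodes: int) -> list[int]:
--     """Return the path from the root node to a specified leaf (closed form)."""
--     assert n_nodes // 2 <= node <= n_nodes - 1, f"Node {node} is not a leaf node"
--     depth = (node + 1).bit_length() - 1
--     return [((node + 1) >> j) - 1 for j in range(depth, -1, -1)]
-- ===== Notes on version B (the rewrite author's own statement) =====
-- stated objective: simpler
-- what changed: Replaces the iterative leaf-to-root parent walk plus final reversal with a closed-form bit-shift formula: the j-th ancestor of node is ((node+1)>>j)-1 in heap indexing, listed from root to leaf directly.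
import Mathlib
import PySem

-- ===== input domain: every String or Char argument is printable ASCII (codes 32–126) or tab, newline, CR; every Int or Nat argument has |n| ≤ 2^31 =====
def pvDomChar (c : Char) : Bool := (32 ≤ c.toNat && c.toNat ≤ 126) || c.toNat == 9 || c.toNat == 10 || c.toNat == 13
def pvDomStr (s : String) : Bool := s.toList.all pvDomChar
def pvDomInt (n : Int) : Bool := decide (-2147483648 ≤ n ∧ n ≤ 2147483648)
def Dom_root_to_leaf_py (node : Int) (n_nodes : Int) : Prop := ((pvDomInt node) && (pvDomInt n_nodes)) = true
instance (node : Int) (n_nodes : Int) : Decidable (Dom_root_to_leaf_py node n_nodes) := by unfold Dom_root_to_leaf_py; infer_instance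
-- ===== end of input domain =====

-- B replaces A's iterative parent walk + reversal with the closed-form bit-shift ancestor
-- formula ((node+1) >> j) - 1 listed from root to leaf; return-value equivalence on leaves.

-- ===== PORT A =====
def pvIsLeftNode (node : Int) : Bool := PySem.Int.mod node 2 == 1

def pvParent (node : Int) : Int :=
  if pvIsLeftNode node then PySem.Int.floordiv (node - 1) 2
  else PySem.Int.floordiv (node - 2) 2

-- termination helper for the while loop (cited by decreasing_by)
theorem pvParent_lt (node : Int) (h : 0 < node) : (pvParent node).toNat < node.toNat := by
  unfold pvParent pvIsLeftNode
  have h2 : (0:Int) < 2 := by omega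
  split <;>
    simp only [PySem.Int.floordiv_eq_ediv_of_pos h2] <;> omega

-- the 'while node != 0' loop; the guard 'node ≤ 0' (instead of node ≠ 0) only makes the
-- recursion total: inside Pre_ the loop never sees a negative node (Python diverges there)
def pvPathLoop (node : Int) (path : List Int) : List Int :=
  if h : node ≤ 0 then path
  else
    let parent := pvParent node
    pvPathLoop parent (path ++ [parent])
termination_by node.toNat
decreasing_by exact pvParent_lt node (by omega)

def root_to_leaf_py (node : Int) (n_nodes : Int) : List Int :=
  -- assert _is_leaf(node, n_nodes): raises outside Pre_; ignored here
  (pvPathLoop node [node]).reverse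

-- ===== PORT B =====
-- Python's 'm >> j' is ported by hand as Nat shiftRight on m.toNat/j.toNat, exact for the
-- nonnegative m and j that occur here (inside Pre_, node+1 ≥ 1 and j ranges over depth..0).
def root_to_leaf_py_alt (node : Int) (n_nodes : Int) : List Int :=
  -- same assert as A: raises outside Pre_; ignored here
  let depth : Int := (PySem.Int.bitLength (node + 1) : Int) - 1
  (PySem.List.pyRange depth (-1) (-1)).map
    (fun j => (((node + 1).toNat >>> j.toNat : Nat) : Int) - 1)

-- ===== PRECONDITION & SPEC =====
-- Pre_ = A's assert '_is_leaf(node, n_nodes)': outside it both Pythons raise AssertionError.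
def Pre_root_to_leaf_py (node : Int) (n_nodes : Int) : Prop :=
  PySem.Int.floordiv n_nodes 2 ≤ node ∧ node ≤ n_nodes - 1
instance (node : Int) (n_nodes : Int) : Decidable (Pre_root_to_leaf_py node n_nodes) := by
  unfold Pre_root_to_leaf_py; infer_instance

def pvWitness_root_to_leaf_py : Int × Int := (5, 7)

def Spec_root_to_leaf_py (node : Int) (n_nodes : Int) (out : List Int) : Prop := out = root_to_leaf_py_alt node n_nodes
instance (node : Int) (n_nodes : Int) (out : List Int) : Decidable (Spec_root_to_leaf_py node n_nodes out) := by unfold Spec_root_to_leaf_py; infer_instance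

-- ===== CLAIM (what is proved, stated in full; the proofs are below) =====
def Claim_equal_root_to_leaf_py : Prop := ∀ (node : Int) (n_nodes : Int), Dom_root_to_leaf_py node n_nodes → Pre_root_to_leaf_py node n_nodes → Spec_root_to_leaf_py node n_nodes (root_to_leaf_py node n_nodes)

-- ===== LEMMAS AND PROOFS =====

-- the loop is the accumulator plus the ancestor chain
def pvChain (node : Int) : List Int :=
  if h : node ≤ 0 then []
  else pvParent node :: pvChain (pvParent node)
termination_by node.toNat
decreasing_by exact pvParent_lt node (by omega)

theorem pvPathLoop_eq_chain (node : Int) (path : List Int) :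
    pvPathLoop node path = path ++ pvChain node := by
  by_cases h : node ≤ 0
  · rw [pvPathLoop, pvChain]; simp [h]
  · rw [pvPathLoop, pvChain]
    simp only [h, dite_false]
    rw [pvPathLoop_eq_chain]
    simp
termination_by node.toNat
decreasing_by exact pvParent_lt node (by omega)

theorem pvParent_eq (node : Int) (h : 0 < node) : pvParent node = (node + 1) / 2 - 1 := by
  unfold pvParent pvIsLeftNode
  have h2 : (0:Int) < 2 := by omega
  have hm : PySem.Int.mod node 2 = node % 2 := PySem.Int.mod_eq_emod_of_pos h2
  split <;> rename_i hc <;>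
    simp only [hm, beq_iff_eq] at hc <;>
    simp only [PySem.Int.floordiv_eq_ediv_of_pos h2] <;> omega

-- split off the final 0 of a countdown range
theorem pvRange_down_split (d : Int) (hd : 0 ≤ d) :
    PySem.List.pyRange d (-1) (-1) = PySem.List.pyRange d 0 (-1) ++ [0] := by
  rw [PySem.List.pyRange_neg_one, PySem.List.pyRange_neg_one]
  have h1 : (d - (-1)).toNat = d.toNat + 1 := by omega
  have h2 : (d - 0).toNat = d.toNat := by omega
  rw [h1, h2, List.range_succ, List.map_append]
  simp
  omega

-- main closed-form characterisation of the chain, by strong induction on node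
theorem pvChain_closed (n : Nat) : ∀ (node : Int), node.toNat = n → 0 ≤ node →
    (pvChain node).reverse ++ [node] =
      (PySem.List.pyRange ((PySem.Int.bitLength (node + 1) : Int) - 1) (-1) (-1)).map
        (fun j => (((node + 1).toNat >>> j.toNat : Nat) : Int) - 1) := by
  induction n using Nat.strong_induction_on with
  | _ n ih =>
    intro node hn h0
    by_cases hz : node ≤ 0
    · have : node = 0 := by omega
      subst this
      rw [pvChain]
      norm_num
      decide
    · replace hz : 0 < node := by omega
      have hp := pvParent_eq node hz
      have hplt := pvParent_lt node hz
      have hp0 : 0 ≤ pvParent node := by rw [hp]; omega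
      -- bit length halving
      have hpos : 0 < node + 1 := by omega
      have hbl : PySem.Int.bitLength (node + 1) =
          PySem.Int.bitLength (PySem.Int.floordiv (node + 1) 2) + 1 :=
        PySem.Int.bitLength_of_pos hpos
      have hfd : PySem.Int.floordiv (node + 1) 2 = pvParent node + 1 := by
        rw [PySem.Int.floordiv_eq_ediv_of_pos (by omega : (0:Int) < 2), hp]; ring
      rw [hfd] at hbl
      have hbp : 1 ≤ PySem.Int.bitLength (pvParent node + 1) := by
        by_contra hcon
        have hb0 : PySem.Int.bitLength (pvParent node + 1) = 0 := by omega
        have hlt := PySem.Int.lt_two_pow_bitLength (pvParent node + 1)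
        rw [hb0] at hlt
        simp at hlt
        omega
      set d : Int := (PySem.Int.bitLength (pvParent node + 1) : Int) with hdd
      have hd0 : 1 ≤ d := by rw [hdd]; exact_mod_cast hbp
      -- unfold one step of the chain
      rw [pvChain]
      simp only [not_le.mpr hz, dite_false]
      have hih := ih (pvParent node).toNat (by omega) (pvParent node) rfl hp0
      rw [List.reverse_cons, List.append_assoc]
      -- rewrite RHS range: bitLength(node+1)-1 = d
      have hblc : ((PySem.Int.bitLength (node + 1) : Int) - 1) = d := by
        rw [hbl]; push_cast; ring
      rw [hblc, pvRange_down_split d (by omega), List.map_append]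
      have hhalf : (pvParent node + 1).toNat = (node + 1).toNat / 2 := by omega
      -- shifted map over the upper part equals parent's full map
      have hshift : (PySem.List.pyRange d 0 (-1)).map
            (fun j => (((node + 1).toNat >>> j.toNat : Nat) : Int) - 1)
          = (PySem.List.pyRange (d - 1) (-1) (-1)).map
            (fun j => (((pvParent node + 1).toNat >>> j.toNat : Nat) : Int) - 1) := by
        rw [PySem.List.pyRange_neg_one, PySem.List.pyRange_neg_one]
        have h1 : (d - 0).toNat = d.toNat := by omega
        have h2 : (d - 1 - (-1)).toNat = d.toNat := by omega
        rw [h1, h2, List.map_map, List.map_map]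
        refine List.map_congr_left ?_
        intro k hk
        simp only [List.mem_range] at hk
        simp only [Function.comp_apply]
        congr 1
        have hdk : (d - (k : Int)).toNat = (d - 1 - (k : Int)).toNat + 1 := by omega
        rw [hdk, hhalf]
        have : ∀ (m t : Nat), m >>> (t + 1) = (m / 2) >>> t := by
          intro m t
          simp [Nat.shiftRight_eq_div_pow, Nat.pow_succ, Nat.div_div_eq_div_mul,
            Nat.mul_comm]
        rw [this]
      have hd1 : ((PySem.Int.bitLength (pvParent node + 1) : Int) - 1) = d - 1 := by
        rw [hdd]
      rw [hd1] at hih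
      rw [hshift, ← hih]
      simp
      omega

-- ===== VERDICT (by name: the statement is the Claim_ definition above) =====
theorem root_to_leaf_py_spec : Claim_equal_root_to_leaf_py := by
  intro node n_nodes _ hpre
  obtain ⟨h1, h2⟩ := hpre
  have h0 : 0 ≤ node := by
    have := PySem.Int.floordiv_eq_ediv_of_pos (by omega : (0:Int) < 2) (a := n_nodes)
    rw [this] at h1
    omega
  unfold Spec_root_to_leaf_py root_to_leaf_py root_to_leaf_py_alt
  rw [pvPathLoop_eq_chain]
  simpa using pvChain_closed node.toNat node rfl h0
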